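-- pv_equiv track=rewrite | github.com/JackRiebel/AIOps | src/a2a_archived/enhanced_orchestrator.py | _extract_network_mention
-- ===== SOURCE A (Python) =====
-- from typing import List, Dict, Any, Optional, Callable, Awaitable, AsyncGenerator, Tuple
--
-- def _extract_network_mention(
--
--     query: str,
--     cached_networks: List[Dict[str, Any]]
-- ) -> Optional[str]:
--     """Extract network name from query by matching against known networks.
--
--     Uses case-insensitive matching and handles partial matches.
--
--     Args:
--         query: The user's query
--         cached_networks: List of cached network objects with 'name' field
--
--     Returns:
--         The matched network name or None
--     """
--     query_lower = query.lower()
--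
--     # Sort by name length descending to match longer names first
--     # This prevents "Home" matching before "Riebel Home"
--     sorted_networks = sorted(
--         cached_networks,
--         key=lambda n: len(n.get("name", "")),
--         reverse=True
--     )
--
--     for network in sorted_networks:
--         network_name = network.get("name", "")
--         if network_name and network_name.lower() in query_lower:
--             return network_name
--
--     return None
-- ===== SOURCE B (Python) =====
-- from typing import List, Dict, Any, Optional
--
-- def _extract_network_mention(
--     query: str,
--     cached_networks: List[Dict[str, Any]]
-- ) -> Optional[str]:
--     """Single pass: keep the longest matching name seen so far (first wins on ties)."""
--     query_lower = query.lower()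
--     best = None
--     best_len = -1
--     for network in cached_networks:
--         name = network.get("name", "")
--         if name and name.lower() in query_lower and len(name) > best_len:
--             best = name
--             best_len = len(name)
--     return best
-- ===== Notes on version B (the rewrite author's own statement) =====
-- stated objective: simpler
-- what changed: Replaced sort-descending-then-return-first-match with a single pass that tracks the longest matching name (strict > keeps the first among equal-length ties, matching the stable sort).
import Mathlib
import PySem

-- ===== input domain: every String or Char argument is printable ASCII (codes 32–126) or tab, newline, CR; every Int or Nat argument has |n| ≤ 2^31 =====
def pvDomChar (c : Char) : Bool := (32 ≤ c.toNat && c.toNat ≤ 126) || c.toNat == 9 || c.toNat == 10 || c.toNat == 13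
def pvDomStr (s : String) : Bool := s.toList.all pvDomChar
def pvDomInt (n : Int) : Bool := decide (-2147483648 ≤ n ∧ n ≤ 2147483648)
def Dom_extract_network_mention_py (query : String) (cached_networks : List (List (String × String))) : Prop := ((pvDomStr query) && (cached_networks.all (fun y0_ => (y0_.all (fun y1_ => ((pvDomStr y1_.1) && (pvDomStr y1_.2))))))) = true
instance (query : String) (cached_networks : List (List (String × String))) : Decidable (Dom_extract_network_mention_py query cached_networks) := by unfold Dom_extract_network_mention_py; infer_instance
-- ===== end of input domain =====

-- B replaces A's sort-descending-then-first-match by a single left-to-right pass keeping the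
-- longest matching name (strict '>' keeps the first of equal-length ties, as the stable sort does).

-- shared accessors (the same Python expressions occur verbatim in both sources)
def pvName (n : List (String × String)) : String := (PySem.Dict.ofList n).getD "name" ""
def pvKey (n : List (String × String)) : Int := PySem.Str.len (pvName n)
def pvMatch (ql : String) (n : List (String × String)) : Bool :=
  !(pvName n == "") && PySem.Str.isIn (PySem.Str.lower (pvName n)) ql

-- ===== PORT A =====
-- the 'for network in sorted_networks: …' loop with its early return
def pvALoop (ql : String) : List (List (String × String)) → Option String
  | [] => none
  | n :: rest => if pvMatch ql n then some (pvName n) else pvALoop ql rest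

def extract_network_mention_py (query : String) (cached_networks : List (List (String × String))) : Option String :=
  let query_lower := PySem.Str.lower query
  pvALoop query_lower (PySem.List.sorted cached_networks pvKey true)

-- ===== PORT B =====
-- body of B's loop: state = (best, best_len)
def pvBStep (ql : String) (st : Option String × Int) (n : List (String × String)) : Option String × Int :=
  if pvMatch ql n && decide (st.2 < pvKey n) then (some (pvName n), pvKey n) else st

def extract_network_mention_py_alt (query : String) (cached_networks : List (List (String × String))) : Option String :=
  let query_lower := PySem.Str.lower query
  (cached_networks.foldl (pvBStep query_lower) (none, -1)).1

-- ===== PRECONDITION & SPEC =====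
def Spec_extract_network_mention_py (query : String) (cached_networks : List (List (String × String))) (out : Option String) : Prop := out = extract_network_mention_py_alt query cached_networks
instance (query : String) (cached_networks : List (List (String × String))) (out : Option String) : Decidable (Spec_extract_network_mention_py query cached_networks out) := by unfold Spec_extract_network_mention_py; infer_instance

-- ===== CLAIM (what is proved, stated in full; the proofs are below) =====
def Claim_equal_extract_network_mention_py : Prop := ∀ (query : String) (cached_networks : List (List (String × String))), Dom_extract_network_mention_py query cached_networks → Spec_extract_network_mention_py query cached_networks (extract_network_mention_py query cached_networks)

-- ===== LEMMAS AND PROOFS =====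

theorem pvKey_nonneg (n : List (String × String)) : 0 ≤ pvKey n := by
  simp [pvKey, PySem.Str.len_eq]

-- inserting into a descending list keeps it descending
theorem pvPairwise_insertBy (x : List (String × String)) :
    ∀ (ys : List (List (String × String))),
    ys.Pairwise (fun a b => pvKey b ≤ pvKey a) →
    (PySem.List.insertBy (fun a b => decide (pvKey b < pvKey a)) x ys).Pairwise
      (fun a b => pvKey b ≤ pvKey a) := by
  intro ys
  induction ys with
  | nil => intro _; simp [PySem.List.insertBy]
  | cons y t ih =>
    intro h
    rw [List.pairwise_cons] at h
    obtain ⟨hpy, hpt⟩ := h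
    by_cases hb : pvKey y < pvKey x
    · simp only [PySem.List.insertBy, hb, decide_true, if_pos]
      rw [List.pairwise_cons]
      refine ⟨?_, List.pairwise_cons.mpr ⟨hpy, hpt⟩⟩
      intro n hn
      rcases List.mem_cons.mp hn with h1 | h1
      · subst h1; omega
      · have := hpy n h1; omega
    · simp only [PySem.List.insertBy, hb, decide_false, Bool.false_eq_true, if_false]
      rw [List.pairwise_cons]
      refine ⟨?_, ih hpt⟩
      intro n hn
      rcases (PySem.List.mem_insertBy _ _ _ _).mp hn with h1 | h1
      · subst h1; omega
      · exact hpy n h1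

theorem pvALoop_eq_some (ql : String) (s : List (List (String × String))) (name : String)
    (h : pvALoop ql s = some name) :
    ∃ m ∈ s, pvMatch ql m = true ∧ pvName m = name := by
  induction s with
  | nil => simp [pvALoop] at h
  | cons y ys ih =>
    by_cases hm : pvMatch ql y = true
    · refine ⟨y, by simp, hm, ?_⟩
      simp [pvALoop, hm] at h; exact h
    · simp [pvALoop, hm] at h
      obtain ⟨m, hmem, hM, hN⟩ := ih h
      exact ⟨m, by simp [hmem], hM, hN⟩

-- the loop/fold invariant tying A's scan of the sorted-so-far list to B's state
def pvInv (ql : String) (s : List (List (String × String))) (st : Option String × Int) : Prop :=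
  s.Pairwise (fun a b => pvKey b ≤ pvKey a) ∧
  pvALoop ql s = st.1 ∧
  (match st.1 with
   | none => st.2 = -1 ∧ ∀ n ∈ s, pvMatch ql n = false
   | some name => st.2 = PySem.Str.len name ∧ ∀ n ∈ s, pvMatch ql n = true → pvKey n ≤ st.2)

theorem pvInv_step (ql : String) (x : List (String × String)) :
    ∀ (s : List (List (String × String))) (st : Option String × Int), pvInv ql s st →
    pvInv ql (PySem.List.insertBy (fun a b => decide (pvKey b < pvKey a)) x s) (pvBStep ql st x) := by
  intro s
  induction s with
  | nil =>
    intro st h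
    obtain ⟨-, hloop, hrest⟩ := h
    simp only [pvALoop] at hloop
    rw [← hloop] at hrest
    obtain ⟨hl, -⟩ := hrest
    have hx0 := pvKey_nonneg x
    by_cases hm : pvMatch ql x = true
    · have hstep : pvBStep ql st x = (some (pvName x), pvKey x) := by
        have : st.2 < pvKey x := by omega
        simp [pvBStep, hm, this]
      rw [hstep]
      refine ⟨by simp [PySem.List.insertBy], by simp [PySem.List.insertBy, pvALoop, hm], ?_⟩
      refine ⟨by simp [pvKey], ?_⟩
      intro n hn
      simp [PySem.List.insertBy] at hn; subst hn
      intro _; exact le_refl _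
    · have hstep : pvBStep ql st x = st := by simp [pvBStep, hm]
      simp only [Bool.not_eq_true] at hm
      rw [hstep]
      refine ⟨by simp [PySem.List.insertBy], ?_, ?_⟩
      · simp [PySem.List.insertBy, pvALoop, hm]; exact hloop
      · rw [← hloop]
        exact ⟨hl, by intro n hn; simp [PySem.List.insertBy] at hn; subst hn; exact hm⟩
  | cons y ys ih =>
    intro st h
    obtain ⟨hpw, hloop, hrest⟩ := h
    have hpw0 := hpw
    rw [List.pairwise_cons] at hpw
    obtain ⟨hpy, hpys⟩ := hpw
    have hall : ∀ n ∈ y :: ys, pvKey n ≤ pvKey y := by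
      intro n hn
      rcases List.mem_cons.mp hn with h1 | h1
      · subst h1; exact le_refl _
      · exact hpy n h1
    have hst2 : st.2 = -1 ∨ st.2 ≤ pvKey y := by
      cases hst : st.1 with
      | none => rw [hst] at hrest; exact Or.inl hrest.1
      | some name =>
        rw [hst] at hrest
        obtain ⟨m, hmem, hM, hN⟩ := pvALoop_eq_some ql _ name (hloop.trans hst)
        right
        have hkm : pvKey m = PySem.Str.len name := by rw [pvKey, hN]
        rw [hrest.1, ← hkm]
        exact hall m hmem
    by_cases hb : pvKey y < pvKey x
    · -- x goes in front: insertBy = x :: y :: ys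
      have hins : PySem.List.insertBy (fun a b => decide (pvKey b < pvKey a)) x (y :: ys)
          = x :: y :: ys := by simp [PySem.List.insertBy, hb]
      have hlt : st.2 < pvKey x := by
        have := pvKey_nonneg x
        rcases hst2 with h1 | h1 <;> omega
      have hpw' : (x :: y :: ys).Pairwise (fun a b => pvKey b ≤ pvKey a) := by
        rw [List.pairwise_cons]
        refine ⟨?_, hpw0⟩
        intro n hn
        have := hall n hn; omega
      by_cases hm : pvMatch ql x = true
      · -- x matches: result state is (some (pvName x), pvKey x)
        have hstep : pvBStep ql st x = (some (pvName x), pvKey x) := by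
          simp [pvBStep, hm, hlt]
        rw [hstep, hins]
        refine ⟨hpw', by simp [pvALoop, hm], ?_, ?_⟩
        · simp [pvKey]
        · intro n hn _
          rcases List.mem_cons.mp hn with h1 | h1
          · subst h1; exact le_refl _
          · have := hall n h1; omega
      · have hstep : pvBStep ql st x = st := by simp [pvBStep, hm]
        simp only [Bool.not_eq_true] at hm
        rw [hstep, hins]
        refine ⟨hpw', by simp [pvALoop, hm]; exact hloop, ?_⟩
        · cases hst : st.1 with
            | none =>
              rw [hst] at hrest
              refine ⟨hrest.1, ?_⟩
              intro n hn
              rcases List.mem_cons.mp hn with h1 | h1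
              · subst h1; exact hm
              · exact hrest.2 n h1
            | some name =>
              rw [hst] at hrest
              refine ⟨hrest.1, ?_⟩
              intro n hn hMn
              rcases List.mem_cons.mp hn with h1 | h1
              · subst h1; rw [hMn] at hm; cases hm
              · exact hrest.2 n h1 hMn
    · -- x goes after y: insertBy = y :: insertBy x ys
      have hins : PySem.List.insertBy (fun a b => decide (pvKey b < pvKey a)) x (y :: ys)
          = y :: PySem.List.insertBy (fun a b => decide (pvKey b < pvKey a)) x ys := by
        simp [PySem.List.insertBy, hb]
      have hkxy : pvKey x ≤ pvKey y := by omega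
      have hpwhead : ∀ n ∈ PySem.List.insertBy (fun a b => decide (pvKey b < pvKey a)) x ys,
          pvKey n ≤ pvKey y := by
        intro n hn
        rcases (PySem.List.mem_insertBy _ _ _ _).mp hn with h1 | h1
        · subst h1; exact hkxy
        · exact hpy n h1
      by_cases hm : pvMatch ql y = true
      · -- y matches: A already returns at y; B's step is a no-op since st.2 ≥ pvKey x
        have hloopy : pvALoop ql (y :: ys) = some (pvName y) := by simp [pvALoop, hm]
        have hst1 : st.1 = some (pvName y) := by rw [← hloop, hloopy]
        rw [hst1] at hrest
        have hl : st.2 = pvKey y := by rw [hrest.1]; rfl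
        have hnostep : pvBStep ql st x = st := by
          have hnl : ¬ st.2 < pvKey x := by omega
          simp [pvBStep, hnl]
        rw [hnostep, hins]
        refine ⟨?_, by simp [pvALoop, hm, hst1], ?_⟩
        · rw [List.pairwise_cons]
          exact ⟨hpwhead, pvPairwise_insertBy x ys hpys⟩
        · rw [hst1]
          refine ⟨hrest.1, ?_⟩
          intro n hn hMn
          rcases List.mem_cons.mp hn with h1 | h1
          · subst h1; rw [hl]
          · rcases (PySem.List.mem_insertBy _ _ _ _).mp h1 with h2 | h2
            · subst h2; omega
            · exact hrest.2 n (by simp [h2]) hMn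
      · -- y does not match: recurse into ys
        simp only [Bool.not_eq_true] at hm
        have hinv_ys : pvInv ql ys st := by
          refine ⟨hpys, ?_, ?_⟩
          · rw [← hloop]; simp [pvALoop, hm]
          · cases hst : st.1 with
            | none => rw [hst] at hrest; exact ⟨hrest.1, fun n hn => hrest.2 n (by simp [hn])⟩
            | some name => rw [hst] at hrest; exact ⟨hrest.1, fun n hn h => hrest.2 n (by simp [hn]) h⟩
        obtain ⟨hpw', hloop', hrest'⟩ := ih st hinv_ys
        rw [hins]
        refine ⟨?_, ?_, ?_⟩
        · rw [List.pairwise_cons]; exact ⟨hpwhead, hpw'⟩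
        · simp only [pvALoop, hm, Bool.false_eq_true, if_false]; exact hloop'
        · cases hst : (pvBStep ql st x).1 with
          | none =>
            rw [hst] at hrest'
            refine ⟨hrest'.1, ?_⟩
            intro n hn
            rcases List.mem_cons.mp hn with h1 | h1
            · subst h1; exact hm
            · exact hrest'.2 n h1
          | some name =>
            rw [hst] at hrest'
            refine ⟨hrest'.1, ?_⟩
            intro n hn hMn
            rcases List.mem_cons.mp hn with h1 | h1
            · subst h1; rw [hMn] at hm; cases hm
            · exact hrest'.2 n h1 hMn

theorem pvInv_foldl (ql : String) :
    ∀ (rest : List (List (String × String))) (s : List (List (String × String)))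
      (st : Option String × Int), pvInv ql s st →
    pvInv ql (rest.foldl (fun acc x => PySem.List.insertBy (fun a b => decide (pvKey b < pvKey a)) x acc) s)
      (rest.foldl (pvBStep ql) st) := by
  intro rest
  induction rest with
  | nil => intro s st h; exact h
  | cons x xs ih =>
    intro s st h
    simp only [List.foldl_cons]
    exact ih _ _ (pvInv_step ql x s st h)

-- ===== VERDICT (by name: the statement is the Claim_ definition above) =====
theorem extract_network_mention_py_spec : Claim_equal_extract_network_mention_py := by
  intro query nets _
  unfold Spec_extract_network_mention_py extract_network_mention_py extract_network_mention_py_alt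
  rw [PySem.List.sorted_rev_eq_foldl_insertBy]
  have h := pvInv_foldl (PySem.Str.lower query) nets [] (none, -1)
    ⟨List.Pairwise.nil, rfl, rfl, fun n hn => absurd hn (List.not_mem_nil)⟩
  exact h.2.1
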